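-- pv_equiv track=rewrite | github.com/eliottcassidy2000/math | 04-computation/palindromic_n_scalar_m.py | compute_N
-- ===== SOURCE A (Python) =====
-- from itertools import permutations
--
-- def ham_paths(A):
--     n = len(A)
--     paths = []
--     for perm in permutations(range(n)):
--         ok = True
--         for k in range(n-1):
--             if A[perm[k]][perm[k+1]] != 1: ok = False; break
--         if ok: paths.append(perm)
--     return paths
--
-- def compute_N(A):
--     n = len(A)
--     N = [[[0]*(n-1) for _ in range(n)] for _ in range(n)]
--     for p in ham_paths(A):
--         for j in range(n-1):
--             a, b = p[j], p[j+1]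
--             N[a][b][j] += 1
--             N[b][a][j] += 1
--     return N
-- ===== SOURCE B (Python) =====
-- def compute_N(A):
--     n = len(A)
--     N = [[[0] * (n - 1) for _ in range(n)] for _ in range(n)]
--
--     def extend(path, remaining):
--         if not remaining:
--             j = 0
--             a = path[0]
--             for b in path[1:]:
--                 N[a][b][j] += 1
--                 N[b][a][j] += 1
--                 a = b
--                 j += 1
--             return
--         last = path[-1]
--         for v in remaining:
--             if A[last][v] == 1:
--                 extend(path + [v], [u for u in remaining if u != v])
--
--     for s in range(n):
--         extend([s], [u for u in range(n) if u != s])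
--     return N
-- ===== Notes on version B (the rewrite author's own statement) =====
-- stated objective: faster
-- what changed: Replaced generate-all-n!-permutations-then-filter with a pruned backtracking DFS that only ever extends a partial path along existing edges and tallies edge positions when a full Hamiltonian path is completed.
import Mathlib
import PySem

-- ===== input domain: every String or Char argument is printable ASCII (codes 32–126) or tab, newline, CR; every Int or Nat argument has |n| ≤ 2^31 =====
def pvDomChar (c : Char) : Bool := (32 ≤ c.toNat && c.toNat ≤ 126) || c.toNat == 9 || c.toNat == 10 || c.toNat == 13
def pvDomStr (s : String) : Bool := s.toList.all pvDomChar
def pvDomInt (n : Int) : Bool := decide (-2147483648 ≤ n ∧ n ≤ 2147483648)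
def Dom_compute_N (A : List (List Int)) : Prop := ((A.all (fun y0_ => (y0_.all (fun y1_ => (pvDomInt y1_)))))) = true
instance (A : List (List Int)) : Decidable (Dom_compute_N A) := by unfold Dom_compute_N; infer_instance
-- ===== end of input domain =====

-- B replaces A's generate-all-permutations-and-filter search by a pruned backtracking DFS that
-- only extends along edges (much faster on non-complete graphs); same return value on Pre_.

-- ===== PORT A =====
-- A[i][j] for 0 ≤ i,j; exact on Pre_ (there the indices hit existing entries, Python never raises)
def pvAdj (A : List (List Int)) (i j : Nat) : Int := (A.getD i []).getD j 0

-- helper for the transliteration of itertools.permutations: each element paired with the rest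
def pvPicks : List Nat → List (Nat × List Nat)
  | [] => []
  | x :: xs => (x, xs) :: (pvPicks xs).map (fun p => (p.1, x :: p.2))

-- itertools.permutations(range(n)) in Python's (lexicographic) order; fuel = length of the list
def pvPermsAux : Nat → List Nat → List (List Nat)
  | 0, _ => [[]]
  | k+1, l => (pvPicks l).flatMap (fun p => (pvPermsAux k p.2).map (p.1 :: ·))

def pvPerms (l : List Nat) : List (List Nat) := pvPermsAux l.length l

-- the inner `for k in range(n-1): if A[perm[k]][perm[k+1]] != 1: ok=False; break` loop
def pvCheck (A : List (List Int)) : List Nat → Bool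
  | a :: b :: rest => if pvAdj A a b ≠ 1 then false else pvCheck A (b :: rest)
  | _ => true

def pvHamPaths (A : List (List Int)) : List (List Nat) :=
  (pvPerms (List.range A.length)).foldl (fun acc p => if pvCheck A p then acc ++ [p] else acc) []

-- N[a][b][j] += 1
def pvBumpA (N : List (List (List Int))) (a b j : Nat) : List (List (List Int)) :=
  N.modify a (fun M => M.modify b (fun r => r.modify j (· + 1)))

-- `for j in range(n-1): a,b = p[j],p[j+1]; N[a][b][j] += 1; N[b][a][j] += 1`
def pvCountA (A : List (List (List Int))) : Nat → List Nat → List (List (List Int))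
  | j, a :: b :: rest => pvCountA (pvBumpA (pvBumpA A a b j) b a j) (j+1) (b :: rest)
  | _, _ => A

def compute_N (A : List (List Int)) : List (List (List Int)) :=
  (pvHamPaths A).foldl (fun N p => pvCountA N 0 p)
    (List.replicate A.length (List.replicate A.length (List.replicate (A.length - 1) 0)))

-- ===== PORT B =====
def pvAdjB (A : List (List Int)) (i j : Nat) : Int := (A.getD i []).getD j 0

def pvBumpB (N : List (List (List Int))) (a b j : Nat) : List (List (List Int)) :=
  N.modify a (fun M => M.modify b (fun r => r.modify j (· + 1)))

-- B's counting at a completed path: a runs over the path, b over path[1:], j counts up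
def pvCountB : List (List (List Int)) → Nat → Nat → List Nat → List (List (List Int))
  | N, _, _, [] => N
  | N, a, j, b :: rest => pvCountB (pvBumpB (pvBumpB N a b j) b a j) b (j+1) rest

-- B's backtracking `extend(path, remaining)`; fuel = len(remaining) (structural recursion)
def pvDfs (A : List (List Int)) : Nat → List Nat → List Nat → List (List (List Int)) → List (List (List Int))
  | 0, path, _, N =>
      match path with
      | [] => N
      | a :: rest => pvCountB N a 0 rest
  | fuel+1, path, rem, N =>
      rem.foldl (fun N v =>
        if pvAdjB A (path.getLast?.getD 0) v = 1 then
          pvDfs A fuel (path ++ [v]) (rem.filter (fun u => u ≠ v)) N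
        else N) N

def compute_N_alt (A : List (List Int)) : List (List (List Int)) :=
  (List.range A.length).foldl
    (fun N s => pvDfs A (A.length - 1) [s] ((List.range A.length).filter (fun u => u ≠ s)) N)
    (List.replicate A.length (List.replicate A.length (List.replicate (A.length - 1) 0)))

-- ===== PRECONDITION & SPEC =====
-- Exactly the inputs on which Python A returns: every off-diagonal entry A[i][j] (i ≠ j < n)
-- must exist, otherwise some permutation's very first edge lookup raises IndexError.
def Pre_compute_N (A : List (List Int)) : Prop :=
  ∀ i ∈ List.range A.length, ∀ j ∈ List.range A.length, i ≠ j → j < (A.getD i []).length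
instance (A : List (List Int)) : Decidable (Pre_compute_N A) := by unfold Pre_compute_N; infer_instance

def pvWitness_compute_N : List (List Int) := [[0, 1], [1, 0]]

def Spec_compute_N (A : List (List Int)) (out : List (List (List Int))) : Prop := out = compute_N_alt A
instance (A : List (List Int)) (out : List (List (List Int))) : Decidable (Spec_compute_N A out) := by unfold Spec_compute_N; infer_instance

-- ===== CLAIM (what is proved, stated in full; the proofs are below) =====
def Claim_equal_compute_N : Prop := ∀ (A : List (List Int)), Dom_compute_N A → Pre_compute_N A → Spec_compute_N A (compute_N A)

-- ===== LEMMAS AND PROOFS =====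

theorem pvPicks_map_fst (l : List Nat) : (pvPicks l).map Prod.fst = l := by
  induction l with
  | nil => rfl
  | cons x xs ih => simp [pvPicks, List.map_map, Function.comp_def, ih]

theorem pvPicks_mem_len {l : List Nat} {p : Nat × List Nat} (h : p ∈ pvPicks l) :
    p.2.length + 1 = l.length := by
  induction l generalizing p with
  | nil => simp [pvPicks] at h
  | cons x xs ih =>
    simp only [pvPicks, List.mem_cons, List.mem_map] at h
    rcases h with h | ⟨q, hq, rfl⟩
    · subst h; rfl
    · simpa using ih hq

theorem pvPicks_snd_eq_filter {l : List Nat} (hnd : l.Nodup) {p : Nat × List Nat}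
    (h : p ∈ pvPicks l) : l.filter (fun u => u ≠ p.1) = p.2 := by
  induction l generalizing p with
  | nil => simp [pvPicks] at h
  | cons x xs ih =>
    have hx : x ∉ xs := (List.nodup_cons.mp hnd).1
    have hxs : xs.Nodup := (List.nodup_cons.mp hnd).2
    simp only [pvPicks, List.mem_cons, List.mem_map] at h
    rcases h with h | ⟨q, hq, rfl⟩
    · subst h
      simp only [List.filter_cons]
      have : (decide (x ≠ x)) = false := by simp
      rw [this]
      simp only [Bool.false_eq_true, if_false]
      exact List.filter_eq_self.mpr (fun u hu => by simp; rintro rfl; exact hx hu)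
    · have hmem : q.1 ∈ xs := by
        have := pvPicks_map_fst xs
        have : q.1 ∈ (pvPicks xs).map Prod.fst := List.mem_map.mpr ⟨q, hq, rfl⟩
        rwa [pvPicks_map_fst] at this
      have hne : x ≠ q.1 := fun hxy => hx (hxy ▸ hmem)
      simp only [List.filter_cons]
      have : (decide (x ≠ q.1)) = true := by simpa using hne
      rw [this]
      simp only [if_true]
      have := ih hxs hq
      simp only at this ⊢
      rw [this]

theorem pvPicks_snd_nodup {l : List Nat} (hnd : l.Nodup) {p : Nat × List Nat}
    (h : p ∈ pvPicks l) : p.2.Nodup := by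
  rw [← pvPicks_snd_eq_filter hnd h]; exact hnd.filter _

theorem pvBumpB_eq : pvBumpB = pvBumpA := rfl

theorem pvCountB_eq_countA (N : List (List (List Int))) (a j : Nat) (l : List Nat) :
    pvCountB N a j l = pvCountA N j (a :: l) := by
  induction l generalizing N a j with
  | nil => rfl
  | cons b rest ih => simp [pvCountB, pvCountA, pvBumpB_eq, ih]

theorem pvFoldl_append_if {α : Type} (c : α → Bool) (l : List α) (acc : List α) :
    l.foldl (fun acc p => if c p then acc ++ [p] else acc) acc = acc ++ l.filter c := by
  induction l generalizing acc with
  | nil => simp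
  | cons x xs ih =>
    simp only [List.foldl_cons, List.filter_cons]
    by_cases h : c x <;> simp [h, ih]

-- main DFS lemma: the backtracking search equals folding the counter over the filtered permutations
theorem pvDfs_eq (A : List (List Int)) (fuel : Nat) :
    ∀ (rem path : List Nat) (N : List (List (List Int))),
      rem.length = fuel → rem.Nodup → path ≠ [] →
      pvDfs A fuel path rem N =
        ((pvPermsAux fuel rem).filter
            (fun q => pvCheck A (path.getLast?.getD 0 :: q))).foldl
          (fun N q => pvCountA N 0 (path ++ q)) N := by
  induction fuel with
  | zero =>
    intro rem path N hlen hnd hne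
    have : rem = [] := List.eq_nil_of_length_eq_zero hlen
    subst this
    match path, hne with
    | a :: rest, _ =>
      simp [pvDfs, pvPermsAux, pvCheck, pvCountB_eq_countA]
  | succ fuel ih =>
    intro rem path N hlen hnd hne
    simp only [pvDfs]
    rw [pvPermsAux]
    rw [List.filter_flatMap, List.foldl_flatMap]
    conv_lhs => rw [← pvPicks_map_fst rem, List.foldl_map]
    refine PySem.List.foldl_congr_mem _ _ _ _ ?_
    intro N' p hp
    have hlen2 : p.2.length = fuel := by have := pvPicks_mem_len hp; omega
    have hnd2 : p.2.Nodup := pvPicks_snd_nodup hnd hp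
    have hfilt : rem.filter (fun u => u ≠ p.1) = p.2 := pvPicks_snd_eq_filter hnd hp
    rw [pvPicks_map_fst rem]
    by_cases hadj : pvAdjB A (path.getLast?.getD 0) p.1 = 1
    · rw [if_pos hadj, hfilt,
        ih p.2 (path ++ [p.1]) N' hlen2 hnd2 (by simp)]
      have hlast : ((path ++ [p.1]).getLast?.getD 0) = p.1 := by
        simp [List.getLast?_append]
      rw [hlast]
      rw [List.filter_map, List.foldl_map]
      congr 1
      · funext N q
        rw [List.append_assoc, List.singleton_append]
      · apply List.filter_congr
        intro q _
        simp only [Function.comp_apply, pvCheck]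
        rw [if_neg]
        simp only [ne_eq, Decidable.not_not]
        exact hadj
    · rw [if_neg hadj]
      have : ((pvPermsAux fuel p.2).map (p.1 :: ·)).filter
          (fun q => pvCheck A (path.getLast?.getD 0 :: q)) = [] := by
        rw [List.filter_map]
        rw [List.filter_eq_nil_iff.mpr]
        · simp
        · intro q _
          simp only [Function.comp_apply, pvCheck]
          rw [if_pos]
          · simp
          · simpa [pvAdjB] using hadj
      rw [this]
      rfl

-- ===== VERDICT (by name: the statement is the Claim_ definition above) =====
theorem compute_N_spec : Claim_equal_compute_N := by
  intro A _ _
  unfold Spec_compute_N compute_N compute_N_alt pvHamPaths pvPerms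
  rw [pvFoldl_append_if]
  simp only [List.nil_append, List.length_range]
  cases hn : A.length with
  | zero => simp [pvPermsAux, pvCheck, pvCountA, List.range_zero]
  | succ m =>
    rw [pvPermsAux]
    rw [List.filter_flatMap, List.foldl_flatMap]
    conv_rhs => rw [← pvPicks_map_fst (List.range (m+1)), List.foldl_map]
    refine (PySem.List.foldl_congr_mem _ _ _ _ ?_).symm
    intro N p hp
    have hnd : (List.range (m+1)).Nodup := List.nodup_range
    have hlen2 : p.2.length = m := by
      have := pvPicks_mem_len hp; simp [List.length_range] at this; omega
    have hnd2 : p.2.Nodup := pvPicks_snd_nodup hnd hp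
    have hfilt : (List.range (m+1)).filter (fun u => u ≠ p.1) = p.2 :=
      pvPicks_snd_eq_filter hnd hp
    rw [pvPicks_map_fst (List.range (m+1)), hfilt]
    have hm : m + 1 - 1 = m := rfl
    rw [hm, pvDfs_eq A m p.2 [p.1] N hlen2 hnd2 (by simp)]
    simp only [List.getLast?_singleton, Option.getD_some, List.singleton_append]
    rw [List.filter_map, List.foldl_map]
    rfl
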